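-- pv_equiv track=rewrite | github.com/victorc365/dexire_integration | modules/nvcbot/states/nvc_states.py | get_age_range
-- ===== SOURCE A (Python) =====
-- def get_age_range(age: int):
--     age_dict = {
--         "18-29": 0.10,
--         "30-39": 0.10,
--         "40-49": 0.10,
--         "50-59": 0.20,
--         "60-69": 0.20,
--         "70-79": 0.10,
--         "80-89": 0.10,
--         "90-100": 0.10
--     }
--     for k in age_dict.keys():
--         if int(k.split("-")[0]) <= age <= int(k.split("-")[1]):
--             return k
-- ===== SOURCE B (Python) =====
-- def get_age_range(age: int):
--     if age < 18 or age > 100: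
--         return None
--     if age < 30:
--         return "18-29"
--     if age >= 90:
--         return "90-100"
--     lo = (age // 10) * 10
--     return f"{lo}-{lo + 9}"
-- ===== Notes on version B (the rewrite author's own statement) =====
-- stated objective: simpler
-- what changed: Replaces the scan over parsed dict-key range strings with a closed-form classification: bounds check, two irregular end buckets, and direct computation of the decade bucket lo=(age//10)*10.
import Mathlib
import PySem

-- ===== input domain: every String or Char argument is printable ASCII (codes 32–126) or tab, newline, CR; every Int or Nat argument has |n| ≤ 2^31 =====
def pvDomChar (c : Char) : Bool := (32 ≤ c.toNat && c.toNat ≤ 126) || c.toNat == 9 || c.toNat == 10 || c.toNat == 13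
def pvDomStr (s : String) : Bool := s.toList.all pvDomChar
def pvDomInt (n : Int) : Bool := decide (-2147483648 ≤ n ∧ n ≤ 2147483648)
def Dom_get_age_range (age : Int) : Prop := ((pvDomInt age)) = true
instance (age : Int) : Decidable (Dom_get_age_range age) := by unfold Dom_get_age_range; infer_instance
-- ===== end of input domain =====

-- B replaces A's scan over parsed range-string keys with a closed-form O(1) bucket computation (simpler).


-- ===== PORT A =====
-- keys of A's age_dict, in insertion order (the float values are never used by A's result)
def pvKeysA : List String :=
  ["18-29", "30-39", "40-49", "50-59", "60-69", "70-79", "80-89", "90-100"]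

-- int(k.split("-")[0]), int(k.split("-")[1]); none = a Python exception (never hit on pvKeysA's literals)
def pvBoundsA (k : String) : Option (Int × Int) :=
  match PySem.Str.split? k "-" with
  | none => none
  | some parts =>
    match PySem.List.pyGet? parts 0, PySem.List.pyGet? parts 1 with
    | some s0, some s1 =>
      match PySem.Int.ofStr? s0, PySem.Int.ofStr? s1 with
      | some lo, some hi => some (lo, hi)
      | _, _ => none
    | _, _ => none

-- the 'for k in age_dict.keys(): if … : return k' loop; falls off the end → none
def pvLoopA (age : Int) : List String → Option String
  | [] => none
  | k :: ks =>
    match pvBoundsA k with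
    | some (lo, hi) => if lo ≤ age ∧ age ≤ hi then some k else pvLoopA age ks
    | none => none

def get_age_range (age : Int) : Option String := pvLoopA age pvKeysA

-- ===== PORT B =====
def get_age_range_alt (age : Int) : Option String :=
  if age < 18 ∨ age > 100 then none
  else if age < 30 then some "18-29"
  else if age ≥ 90 then some "90-100"
  else
    let lo := PySem.Int.floordiv age 10 * 10
    some (PySem.Int.toStr lo ++ "-" ++ PySem.Int.toStr (lo + 9))

-- ===== PRECONDITION & SPEC =====
def Spec_get_age_range (age : Int) (out : Option String) : Prop := out = get_age_range_alt age
instance (age : Int) (out : Option String) : Decidable (Spec_get_age_range age out) := by unfold Spec_get_age_range; infer_instance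

-- ===== CLAIM (what is proved, stated in full; the proofs are below) =====
def Claim_equal_get_age_range : Prop := ∀ (age : Int), Dom_get_age_range age → Spec_get_age_range age (get_age_range age)

-- ===== LEMMAS AND PROOFS =====
theorem pvB1 : pvBoundsA "18-29" = some (18, 29) := by decide
theorem pvB2 : pvBoundsA "30-39" = some (30, 39) := by decide
theorem pvB3 : pvBoundsA "40-49" = some (40, 49) := by decide
theorem pvB4 : pvBoundsA "50-59" = some (50, 59) := by decide
theorem pvB5 : pvBoundsA "60-69" = some (60, 69) := by decide
theorem pvB6 : pvBoundsA "70-79" = some (70, 79) := by decide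
theorem pvB7 : pvBoundsA "80-89" = some (80, 89) := by decide
theorem pvB8 : pvBoundsA "90-100" = some (90, 100) := by decide

-- ===== VERDICT (by name: the statement is the Claim_ definition above) =====
theorem get_age_range_spec : Claim_equal_get_age_range := by
  intro age _
  unfold Spec_get_age_range
  by_cases h : 18 ≤ age ∧ age ≤ 100
  · obtain ⟨h1, h2⟩ := h
    interval_cases age <;> decide
  · simp only [get_age_range, pvKeysA, pvLoopA, pvB1, pvB2, pvB3, pvB4, pvB5, pvB6, pvB7, pvB8,
      get_age_range_alt]
    split_ifs <;> first | rfl | omega
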